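-- pv_equiv track=rewrite | github.com/wrrulosdev/rstatus | src/rstatus/utils/clear.py | replace_mini_message_color_codes_with_minecraft_colors
-- ===== SOURCE A (Python) =====
-- def replace_mini_message_color_codes_with_minecraft_colors(message: str) -> str:
--     """
--     Replace MiniMessage colored characters with Minecraft color codes.
--
--     :param message: Message with the mini message color codes
--     :return: Message with the Minecraft color codes
--     """
--     codes: dict = {
--         '<reset><black>': '0',
--         '<reset><dark_blue>': '1',
--         '<reset><dark_green>': '2',
--         '<reset><dark_aqua>': '3',
--         '<reset><dark_red>': '4',
--         '<reset><dark_purple>': '5',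
--         '<reset><gold>': '6',
--         '<reset><gray>': '7',
--         '<reset><dark_gray>': '8',
--         '<reset><blue>': '9',
--         '<reset><green>': 'a',
--         '<reset><aqua>': 'b',
--         '<reset><red>': 'c',
--         '<reset><light_purple>': 'd',
--         '<reset><yellow>': 'e',
--         '<reset><white>': 'f',
--         '<obfuscated>': 'k',
--         '<bold>': 'l',
--         '<strikethrough>': 'm',
--         '<underlined>': 'n',
--         '<italic>': 'o',
--         '<reset>': 'r',
--     }
--
--     for code in codes.items():
--         message = message.replace(code[0], f'&{code[1]}').replace(code[0], f'&{code[1]}')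
--
--     message = message.replace('<newline>', '\n')
--     return message
-- ===== SOURCE B (Python) =====
-- def replace_mini_message_color_codes_with_minecraft_colors(message: str) -> str:
--     """Single left-to-right scan: at each position try the tags in priority
--     order (compound '<reset><color>' before bare '<reset>'), emit the code and
--     jump over the tag, instead of 45 whole-string replace passes."""
--     tags = [
--         ('<reset><black>', '&0'),
--         ('<reset><dark_blue>', '&1'),
--         ('<reset><dark_green>', '&2'),
--         ('<reset><dark_aqua>', '&3'),
--         ('<reset><dark_red>', '&4'),
--         ('<reset><dark_purple>', '&5'),
--         ('<reset><gold>', '&6'),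
--         ('<reset><gray>', '&7'),
--         ('<reset><dark_gray>', '&8'),
--         ('<reset><blue>', '&9'),
--         ('<reset><green>', '&a'),
--         ('<reset><aqua>', '&b'),
--         ('<reset><red>', '&c'),
--         ('<reset><light_purple>', '&d'),
--         ('<reset><yellow>', '&e'),
--         ('<reset><white>', '&f'),
--         ('<obfuscated>', '&k'),
--         ('<bold>', '&l'),
--         ('<strikethrough>', '&m'),
--         ('<underlined>', '&n'),
--         ('<italic>', '&o'),
--         ('<reset>', '&r'),
--         ('<newline>', '\n'),
--     ]
--     out = []
--     i = 0
--     n = len(message)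
--     while i < n:
--         for tag, code in tags:
--             if message.startswith(tag, i):
--                 out.append(code)
--                 i += len(tag)
--                 break
--         else:
--             out.append(message[i])
--             i += 1
--     return ''.join(out)
-- ===== Notes on version B (the rewrite author's own statement) =====
-- stated objective: alternative
-- what changed: Instead of 45 sequential whole-string replace passes (each dict tag replaced twice, then the newline tag), B makes one left-to-right scan that at each position tries the tags in the same priority order (compound reset+color tags before the bare reset tag), emits the corresponding Minecraft code or a newline and jumps past the tag.
import Mathlib
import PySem

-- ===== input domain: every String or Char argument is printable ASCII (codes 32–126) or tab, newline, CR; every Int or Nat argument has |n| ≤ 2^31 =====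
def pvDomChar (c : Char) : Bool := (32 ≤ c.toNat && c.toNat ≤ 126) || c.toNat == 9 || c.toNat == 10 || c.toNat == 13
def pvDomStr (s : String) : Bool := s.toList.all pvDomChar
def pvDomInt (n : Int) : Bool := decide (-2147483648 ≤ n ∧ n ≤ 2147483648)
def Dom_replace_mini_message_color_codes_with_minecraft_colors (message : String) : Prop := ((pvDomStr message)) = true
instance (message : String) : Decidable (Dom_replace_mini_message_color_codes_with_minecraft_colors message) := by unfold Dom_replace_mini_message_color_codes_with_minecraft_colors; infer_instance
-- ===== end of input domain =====

-- B replaces A's 45 whole-string `.replace` passes by one left-to-right scan that tries the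
-- tags in priority order at each position (objective: alternative single-pass algorithm).

-- ===== PORT A =====
def pvCodesA : PySem.Dict String String := ⟨[
  ("<reset><black>", "0"), ("<reset><dark_blue>", "1"), ("<reset><dark_green>", "2"),
  ("<reset><dark_aqua>", "3"), ("<reset><dark_red>", "4"), ("<reset><dark_purple>", "5"),
  ("<reset><gold>", "6"), ("<reset><gray>", "7"), ("<reset><dark_gray>", "8"),
  ("<reset><blue>", "9"), ("<reset><green>", "a"), ("<reset><aqua>", "b"),
  ("<reset><red>", "c"), ("<reset><light_purple>", "d"), ("<reset><yellow>", "e"),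
  ("<reset><white>", "f"), ("<obfuscated>", "k"), ("<bold>", "l"),
  ("<strikethrough>", "m"), ("<underlined>", "n"), ("<italic>", "o"), ("<reset>", "r")]⟩

def replace_mini_message_color_codes_with_minecraft_colors (message : String) : String :=
  let message1 := pvCodesA.items.foldl
    (fun m code =>
      PySem.Str.replace (PySem.Str.replace m code.1 ("&" ++ code.2)) code.1 ("&" ++ code.2))
    message
  PySem.Str.replace message1 "<newline>" "\n"

-- ===== PORT B =====
def pvTagsB : List (String × String) := [
  ("<reset><black>", "&0"), ("<reset><dark_blue>", "&1"), ("<reset><dark_green>", "&2"),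
  ("<reset><dark_aqua>", "&3"), ("<reset><dark_red>", "&4"), ("<reset><dark_purple>", "&5"),
  ("<reset><gold>", "&6"), ("<reset><gray>", "&7"), ("<reset><dark_gray>", "&8"),
  ("<reset><blue>", "&9"), ("<reset><green>", "&a"), ("<reset><aqua>", "&b"),
  ("<reset><red>", "&c"), ("<reset><light_purple>", "&d"), ("<reset><yellow>", "&e"),
  ("<reset><white>", "&f"), ("<obfuscated>", "&k"), ("<bold>", "&l"),
  ("<strikethrough>", "&m"), ("<underlined>", "&n"), ("<italic>", "&o"),
  ("<reset>", "&r"), ("<newline>", "\n")]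

def pvTagsC : List (List Char × List Char) := pvTagsB.map (fun kv => (kv.1.toList, kv.2.toList))

-- needed by pvScan's termination proof
theorem pvTagsC_pos : ∀ pr ∈ pvTagsC, 0 < pr.1.length := by decide

def pvScan (l : List Char) : List Char :=
  match l with
  | [] => []
  | c :: t =>
    match h : pvTagsC.find? (fun pr => pr.1.isPrefixOf (c :: t)) with
    | some pr => pr.2 ++ pvScan ((c :: t).drop pr.1.length)
    | none => c :: pvScan t
termination_by l.length
decreasing_by
  · have hp : 0 < pr.1.length := pvTagsC_pos pr (List.mem_of_find?_eq_some h)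
    simp only [List.length_drop, List.length_cons]
    omega
  · simp

def replace_mini_message_color_codes_with_minecraft_colors_alt (message : String) : String :=
  String.ofList (pvScan message.toList)

-- ===== PRECONDITION & SPEC =====
def Spec_replace_mini_message_color_codes_with_minecraft_colors (message : String) (out : String) : Prop := out = replace_mini_message_color_codes_with_minecraft_colors_alt message
instance (message : String) (out : String) : Decidable (Spec_replace_mini_message_color_codes_with_minecraft_colors message out) := by unfold Spec_replace_mini_message_color_codes_with_minecraft_colors; infer_instance

-- ===== CLAIM (what is proved, stated in full; the proofs are below) =====
def Claim_equal_replace_mini_message_color_codes_with_minecraft_colors : Prop := ∀ (message : String), Dom_replace_mini_message_color_codes_with_minecraft_colors message → Spec_replace_mini_message_color_codes_with_minecraft_colors message (replace_mini_message_color_codes_with_minecraft_colors message)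

-- ===== LEMMAS AND PROOFS =====

-- structural ("fuel-free") form of PySem.Chars.replace for a nonempty pattern
def pvRepl (old rep : List Char) : List Char → List Char
  | [] => []
  | c :: t =>
    if old.isPrefixOf (c :: t) then rep ++ pvRepl old rep (t.drop (old.length - 1))
    else c :: pvRepl old rep t
termination_by l => l.length
decreasing_by
  · simp only [List.length_drop, List.length_cons]; omega
  · simp

theorem pvGo_eq (old rep : List Char) (hold : old ≠ []) :
    ∀ fuel l acc, l.length ≤ fuel →
      PySem.Chars.replace.go old rep fuel l acc = acc.reverse ++ pvRepl old rep l := by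
  intro fuel
  induction fuel with
  | zero =>
    intro l acc h
    have hl : l = [] := List.length_eq_zero_iff.mp (Nat.le_zero.mp h)
    subst hl
    simp [PySem.Chars.replace.go, pvRepl]
  | succ n ih =>
    intro l acc h
    cases l with
    | nil => simp [PySem.Chars.replace.go, pvRepl]
    | cons c t =>
      obtain ⟨o, os, rfl⟩ : ∃ o os, old = o :: os := by
        cases old with
        | nil => exact absurd rfl hold
        | cons o os => exact ⟨o, os, rfl⟩
      by_cases hp : (o :: os).isPrefixOf (c :: t)
      · have hdrop : (c :: t).drop (o :: os).length = t.drop os.length := by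
          simp
        rw [show PySem.Chars.replace.go (o :: os) rep (n+1) (c :: t) acc
              = PySem.Chars.replace.go (o :: os) rep n ((c :: t).drop (o :: os).length)
                  (rep.reverse ++ acc) by
            simp [PySem.Chars.replace.go, hp]]
        rw [hdrop, ih (t.drop os.length) (rep.reverse ++ acc)
              (by simp only [List.length_drop, List.length_cons] at h ⊢; omega)]
        rw [pvRepl, if_pos hp]
        simp
      · rw [show PySem.Chars.replace.go (o :: os) rep (n+1) (c :: t) acc
              = PySem.Chars.replace.go (o :: os) rep n t (c :: acc) by
            simp [PySem.Chars.replace.go, hp]]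
        rw [ih t (c :: acc) (by simpa using Nat.lt_succ_iff.mp (by simpa using h))]
        rw [pvRepl, if_neg hp]
        simp

theorem pvReplace_eq (old rep l : List Char) (hold : old ≠ []) :
    PySem.Chars.replace l old rep = pvRepl old rep l := by
  unfold PySem.Chars.replace
  rw [if_neg (by simp [List.isEmpty_iff, hold])]
  simpa using pvGo_eq old rep hold l.length l [] le_rfl

theorem pvRepl_nil (old rep : List Char) : pvRepl old rep [] = [] := by
  simp [pvRepl]

theorem pvRepl_cons_neg (old rep : List Char) (c : Char) (t : List Char)
    (h : ¬ old <+: (c :: t)) : pvRepl old rep (c :: t) = c :: pvRepl old rep t := by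
  rw [pvRepl, if_neg (by simpa [List.isPrefixOf_iff_prefix] using h)]

theorem pvRepl_pref (old rep u : List Char) (hold : old ≠ []) :
    pvRepl old rep (old ++ u) = rep ++ pvRepl old rep u := by
  obtain ⟨o, os, rfl⟩ : ∃ o os, old = o :: os := by
    cases old with
    | nil => exact absurd rfl hold
    | cons o os => exact ⟨o, os, rfl⟩
  rw [show (o :: os) ++ u = o :: (os ++ u) by simp]
  rw [pvRepl, if_pos (by
    rw [List.isPrefixOf_iff_prefix, show o :: (os ++ u) = (o :: os) ++ u by simp]
    exact (o :: os).prefix_append u)]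
  simp

-- a prefix of the output that avoids the replacement's head char was already a prefix of the input
theorem pvPrefixRev (old : List Char) (hd : Char) (rtl : List Char) :
    ∀ n q l, l.length ≤ n → hd ∉ q → q <+: pvRepl old (hd :: rtl) l → q <+: l := by
  intro n
  induction n with
  | zero =>
    intro q l hl _ hq
    have : l = [] := List.length_eq_zero_iff.mp (Nat.le_zero.mp hl)
    subst this
    rwa [pvRepl_nil] at hq
  | succ n ih =>
    intro q l hl hhd hq
    cases l with
    | nil => rwa [pvRepl_nil] at hq
    | cons c t =>
      rw [pvRepl] at hq
      by_cases hp : old.isPrefixOf (c :: t)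
      · rw [if_pos hp] at hq
        cases q with
        | nil => exact List.nil_prefix
        | cons x q' =>
          rw [show (hd :: rtl) ++ pvRepl old (hd :: rtl) (t.drop (old.length - 1))
                = hd :: (rtl ++ pvRepl old (hd :: rtl) (t.drop (old.length - 1))) by simp] at hq
          rw [List.cons_prefix_cons] at hq
          exact absurd (hq.1 ▸ List.mem_cons_self) hhd
      · rw [if_neg hp] at hq
        cases q with
        | nil => exact List.nil_prefix
        | cons x q' =>
          rw [List.cons_prefix_cons] at hq
          have : q' <+: t := by
            refine ih q' t ?_ (fun h => hhd (List.mem_cons_of_mem _ h)) hq.2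
            simpa using Nat.lt_succ_iff.mp (by simpa using hl)
          exact (List.cons_prefix_cons).mpr ⟨hq.1, this⟩

theorem pvNoStartAppend (q a u : List Char) (h1 : ¬ q <+: a) (h2 : ¬ a <+: q) :
    ¬ q <+: (a ++ u) := fun h =>
  (List.prefix_or_prefix_of_prefix h (a.prefix_append u)).elim h1 h2

theorem pvSkip (old rep : List Char) :
    ∀ a u, (∀ m, m < a.length → ¬ old <+: (a.drop m ++ u)) →
      pvRepl old rep (a ++ u) = a ++ pvRepl old rep u := by
  intro a
  induction a with
  | nil => intro u _; simp
  | cons c a' ih =>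
    intro u h
    rw [List.cons_append, pvRepl_cons_neg old rep c (a' ++ u)
        (by simpa using h 0 (by simp))]
    rw [ih u (fun m hm => by simpa using h (m + 1) (by simpa using Nat.succ_lt_succ hm))]
    simp

theorem pvPStep (old : List Char) (hd : Char) (rtl : List Char) (q p u : List Char)
    (hq : hd ∉ q) (h : ¬ q <+: p ++ u) : ¬ q <+: p ++ pvRepl old (hd :: rtl) u := by
  intro hpre
  rcases List.prefix_or_prefix_of_prefix hpre (p.prefix_append _) with h1 | h1
  · exact h (h1.trans (p.prefix_append u))
  · obtain ⟨q', rfl⟩ := h1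
    have h2 : q' <+: pvRepl old (hd :: rtl) u := (List.prefix_append_right_inj p).mp hpre
    have h3 : q' <+: u :=
      pvPrefixRev old hd rtl u.length q' u le_rfl
        (fun hm => hq (List.mem_append_right p hm)) h2
    exact h ((List.prefix_append_right_inj p).mpr h3)

def pvApply (ops : List (List Char × List Char)) (l : List Char) : List Char :=
  ops.foldl (fun m pr => pvRepl pr.1 pr.2 m) l

theorem pvApply_nil (ops : List (List Char × List Char)) : pvApply ops [] = [] := by
  induction ops with
  | nil => rfl
  | cons op rest ih => simpa [pvApply, pvRepl_nil] using ih

theorem pvApply_cons (op : List Char × List Char) (ops : List (List Char × List Char))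
    (l : List Char) : pvApply (op :: ops) l = pvApply ops (pvRepl op.1 op.2 l) := rfl

theorem pvApply_append (xs ys : List (List Char × List Char)) (l : List Char) :
    pvApply (xs ++ ys) l = pvApply ys (pvApply xs l) := by
  simp [pvApply, List.foldl_append]

-- facts about the fixed tag table, established by one computation
def pvCheck : Bool :=
  pvTagsC.all (fun pr =>
    !pr.1.isEmpty && !pr.2.isEmpty &&
    pvTagsC.all (fun qr =>
      (match pr.2 with | [] => false | hd :: _ => !qr.1.contains hd) &&
      (List.range pr.1.length).all (fun m =>
        m == 0 || (!(qr.1.isPrefixOf (pr.1.drop m)) && !((pr.1.drop m).isPrefixOf qr.1))) &&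
      (List.range pr.2.length).all (fun m =>
        !(qr.1.isPrefixOf (pr.2.drop m)) && !((pr.2.drop m).isPrefixOf qr.1))))

set_option maxRecDepth 4096 in
theorem pvCheck_true : pvCheck = true := by decide

theorem pvFactNe : ∀ pr ∈ pvTagsC, pr.1 ≠ [] ∧ pr.2 ≠ [] := by
  intro pr hpr
  have h0 := pvCheck_true
  unfold pvCheck at h0
  have h := List.all_eq_true.mp h0 pr hpr
  simp only [Bool.and_eq_true, Bool.not_eq_true', List.isEmpty_eq_false_iff] at h
  exact ⟨h.1.1, h.1.2⟩

theorem pvFactInner : ∀ pr ∈ pvTagsC, ∀ qr ∈ pvTagsC,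
    ((match pr.2 with | [] => false | hd :: _ => !qr.1.contains hd) &&
      ((List.range pr.1.length).all (fun m =>
        m == 0 || (!(qr.1.isPrefixOf (pr.1.drop m)) && !((pr.1.drop m).isPrefixOf qr.1)))) &&
      ((List.range pr.2.length).all (fun m =>
        !(qr.1.isPrefixOf (pr.2.drop m)) && !((pr.2.drop m).isPrefixOf qr.1)))) = true := by
  intro pr hpr qr hqr
  have h0 := pvCheck_true
  unfold pvCheck at h0
  have h := List.all_eq_true.mp h0 pr hpr
  simp only [Bool.and_eq_true] at h
  have h2 := List.all_eq_true.mp h.2 qr hqr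
  simpa [Bool.and_eq_true] using h2

theorem pvFactHd : ∀ pr ∈ pvTagsC, ∀ qr ∈ pvTagsC, ∀ hd : Char,
    pr.2.head? = some hd → hd ∉ qr.1 := by
  intro pr hpr qr hqr hd hhd
  have h' := pvFactInner pr hpr qr hqr
  simp only [Bool.and_eq_true] at h'
  have h := h'.1.1
  cases hp2 : pr.2 with
  | nil => rw [hp2] at hhd; simp at hhd
  | cons x xs =>
    rw [hp2] at hhd h
    have hx : x = hd := by simpa using hhd
    subst hx
    simpa using h

theorem pvFactInt : ∀ pr ∈ pvTagsC, ∀ qr ∈ pvTagsC, ∀ m, 0 < m → m < pr.1.length →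
    ¬ qr.1 <+: pr.1.drop m ∧ ¬ pr.1.drop m <+: qr.1 := by
  intro pr hpr qr hqr m hm0 hmlen
  have h' := pvFactInner pr hpr qr hqr
  simp only [Bool.and_eq_true] at h'
  have h := h'.1.2
  have h2 := List.all_eq_true.mp h m (List.mem_range.mpr hmlen)
  simp only [Bool.or_eq_true, beq_iff_eq, Bool.and_eq_true] at h2
  rcases h2 with h2 | h2
  · omega
  · refine ⟨fun hp => ?_, fun hp => ?_⟩
    · have := List.isPrefixOf_iff_prefix.mpr hp; simp [this] at h2
    · have := List.isPrefixOf_iff_prefix.mpr hp; simp [this] at h2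

theorem pvFactRep : ∀ pr ∈ pvTagsC, ∀ qr ∈ pvTagsC, ∀ m, m < pr.2.length →
    ¬ qr.1 <+: pr.2.drop m ∧ ¬ pr.2.drop m <+: qr.1 := by
  intro pr hpr qr hqr m hmlen
  have h' := pvFactInner pr hpr qr hqr
  simp only [Bool.and_eq_true] at h'
  have h := h'.2
  have h2 := List.all_eq_true.mp h m (List.mem_range.mpr hmlen)
  simp only [Bool.and_eq_true] at h2
  refine ⟨fun hp => ?_, fun hp => ?_⟩
  · have := List.isPrefixOf_iff_prefix.mpr hp; simp [this] at h2
  · have := List.isPrefixOf_iff_prefix.mpr hp; simp [this] at h2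

-- apply a list of table ops across a prefix "a" none of them can match into
theorem pvChainSkip :
    ∀ ops : List (List Char × List Char), (∀ op ∈ ops, op ∈ pvTagsC) →
    ∀ a : List Char,
      (∀ op ∈ ops, ∀ m, 0 < m → m < a.length → ¬ op.1 <+: a.drop m ∧ ¬ a.drop m <+: op.1) →
    ∀ u, (∀ op ∈ ops, ¬ op.1 <+: a ++ u) →
      pvApply ops (a ++ u) = a ++ pvApply ops u := by
  intro ops
  induction ops with
  | nil => intro _ a _ u _; rfl
  | cons op rest ih =>
    intro hmem a hint u h0
    have hstep : pvRepl op.1 op.2 (a ++ u) = a ++ pvRepl op.1 op.2 u := by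
      refine pvSkip op.1 op.2 a u (fun m hm => ?_)
      cases m with
      | zero => simpa using h0 op List.mem_cons_self
      | succ k =>
        have hi := hint op List.mem_cons_self (k + 1) (Nat.succ_pos k) hm
        exact pvNoStartAppend _ _ _ hi.1 hi.2
    rw [pvApply_cons, hstep]
    obtain ⟨hd, rtl, hrep⟩ : ∃ hd rtl, op.2 = hd :: rtl := by
      have hne := (pvFactNe op (hmem op List.mem_cons_self)).2
      cases hh : op.2 with
      | nil => exact absurd hh hne
      | cons hd rtl => exact ⟨hd, rtl, rfl⟩
    refine ih (fun x hx => hmem x (List.mem_cons_of_mem _ hx)) a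
      (fun x hx => hint x (List.mem_cons_of_mem _ hx)) (pvRepl op.1 op.2 u)
      (fun x hx => ?_)
    have hhd : hd ∉ x.1 :=
      pvFactHd op (hmem op List.mem_cons_self) x (hmem x (List.mem_cons_of_mem _ hx)) hd
        (by rw [hrep]; rfl)
    rw [hrep]
    exact pvPStep op.1 hd rtl x.1 a u hhd (h0 x (List.mem_cons_of_mem _ hx))

-- when no tag matches at position 0, every op passes the head char through
theorem pvApplyHead :
    ∀ ops : List (List Char × List Char), (∀ op ∈ ops, op ∈ pvTagsC) →
    ∀ c t, (∀ qr ∈ pvTagsC, ¬ qr.1 <+: (c :: t)) →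
      pvApply ops (c :: t) = c :: pvApply ops t := by
  intro ops
  induction ops with
  | nil => intro _ c t _; rfl
  | cons op rest ih =>
    intro hmem c t h
    rw [pvApply_cons,
      pvRepl_cons_neg op.1 op.2 c t (h op (hmem op List.mem_cons_self))]
    obtain ⟨hd, rtl, hrep⟩ : ∃ hd rtl, op.2 = hd :: rtl := by
      have hne := (pvFactNe op (hmem op List.mem_cons_self)).2
      cases hh : op.2 with
      | nil => exact absurd hh hne
      | cons hd rtl => exact ⟨hd, rtl, rfl⟩
    refine ih (fun x hx => hmem x (List.mem_cons_of_mem _ hx)) c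
      (pvRepl op.1 op.2 t) (fun qr hqr hpre => ?_)
    cases hq1 : qr.1 with
    | nil => exact h qr hqr (hq1 ▸ List.nil_prefix)
    | cons x q' =>
      rw [hq1, List.cons_prefix_cons] at hpre
      have hq' : q' <+: t := by
        refine pvPrefixRev op.1 hd rtl t.length q' t le_rfl ?_ (hrep ▸ hpre.2)
        intro hmm
        exact pvFactHd op (hmem op List.mem_cons_self) qr hqr hd (by rw [hrep]; rfl)
          (hq1 ▸ List.mem_cons_of_mem _ hmm)
      exact h qr hqr (hq1 ▸ (List.cons_prefix_cons).mpr ⟨hpre.1, hq'⟩)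

-- A's op sequence: each tag twice, the last tag (newline) once
def pvOps : List (List Char × List Char) → List (List Char × List Char)
  | [] => []
  | x :: rest =>
    match rest with
    | [] => [x]
    | _ :: _ => x :: x :: pvOps rest

theorem pvOps_cons_ne (x : List Char × List Char) (rest : List (List Char × List Char))
    (h : rest ≠ []) : pvOps (x :: rest) = x :: x :: pvOps rest := by
  cases rest with
  | nil => exact absurd rfl h
  | cons y ys => rfl

theorem pvOps_mem : ∀ ts x, x ∈ pvOps ts → x ∈ ts := by
  intro ts
  induction ts with
  | nil => intro x h; simpa [pvOps] using h
  | cons y ys ih =>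
    intro x h
    cases ys with
    | nil => simpa [pvOps] using h
    | cons z zs =>
      rw [pvOps_cons_ne y (z :: zs) (by simp)] at h
      simp only [List.mem_cons] at h ⊢
      rcases h with h | h | h
      · exact Or.inl h
      · exact Or.inl h
      · exact Or.inr (by simpa using ih x h)

theorem pvOps_split : ∀ (as : List (List Char × List Char)) (pr : List Char × List Char) bs,
    pvOps (as ++ pr :: bs) =
      (as.flatMap fun x => [x, x]) ++ pr :: (if bs.isEmpty then [] else pr :: pvOps bs) := by
  intro as
  induction as with
  | nil =>
    intro pr bs
    cases bs with
    | nil => simp [pvOps]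
    | cons b bs' => rw [List.nil_append, pvOps_cons_ne pr (b :: bs') (by simp)]; simp
  | cons a as' ih =>
    intro pr bs
    rw [List.cons_append, pvOps_cons_ne a (as' ++ pr :: bs) (by simp), ih pr bs]
    simp

theorem pvMemDup (as : List (List Char × List Char)) (x : List Char × List Char)
    (hx : x ∈ as.flatMap fun y => [y, y]) : x ∈ as := by
  simp only [List.mem_flatMap, List.mem_cons, List.not_mem_nil, or_false] at hx
  obtain ⟨y, hy, h1 | h1⟩ := hx <;> exact h1 ▸ hy

theorem pvScan_none (c : Char) (t : List Char)
    (hf : pvTagsC.find? (fun pr => pr.1.isPrefixOf (c :: t)) = none) :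
    pvScan (c :: t) = c :: pvScan t := by
  rw [pvScan]
  split <;> simp_all

theorem pvScan_some (c : Char) (t : List Char) (pr : List Char × List Char)
    (hf : pvTagsC.find? (fun pr => pr.1.isPrefixOf (c :: t)) = some pr) :
    pvScan (c :: t) = pr.2 ++ pvScan ((c :: t).drop pr.1.length) := by
  rw [pvScan]
  split <;> simp_all

theorem pvMain : ∀ n l, l.length ≤ n → pvApply (pvOps pvTagsC) l = pvScan l := by
  intro n
  induction n with
  | zero =>
    intro l hl
    have : l = [] := List.length_eq_zero_iff.mp (Nat.le_zero.mp hl)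
    subst this
    rw [pvApply_nil, pvScan]
  | succ n ih =>
    intro l hl
    cases l with
    | nil => rw [pvApply_nil, pvScan]
    | cons c t =>
      have hlt : t.length ≤ n := by
        simp only [List.length_cons] at hl; omega
      cases hf : pvTagsC.find? (fun pr => pr.1.isPrefixOf (c :: t)) with
      | none =>
        have hall : ∀ qr ∈ pvTagsC, ¬ qr.1 <+: (c :: t) := by
          intro qr hqr hp
          have hfe := List.find?_eq_none.mp hf qr hqr
          apply hfe
          simpa using List.isPrefixOf_iff_prefix.mpr hp
        rw [pvApplyHead (pvOps pvTagsC) (pvOps_mem pvTagsC) c t hall, ih t hlt,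
          pvScan_none c t hf]
      | some pr =>
        obtain ⟨hpred, as, bs, hsplit, hprev⟩ := List.find?_eq_some_iff_append.mp hf
        have hprC : pr ∈ pvTagsC := List.mem_of_find?_eq_some hf
        have hpre0 : pr.1 <+: c :: t := List.isPrefixOf_iff_prefix.mp (by simpa using hpred)
        obtain ⟨u, hu⟩ := hpre0
        have hasmem : ∀ x ∈ as, x ∈ pvTagsC := fun x hx =>
          hsplit ▸ List.mem_append_left _ hx
        have hbsmem : ∀ x ∈ bs, x ∈ pvTagsC := fun x hx =>
          hsplit ▸ List.mem_append_right _ (List.mem_cons_of_mem _ hx)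
        have hops : pvOps pvTagsC =
            ((as.flatMap fun x => [x, x]) ++
              pr :: (if bs.isEmpty then [] else pr :: pvOps bs)) := by
          rw [hsplit]; exact pvOps_split as pr bs
        have hpremem : ∀ x ∈ (as.flatMap fun y => [y, y]), x ∈ pvTagsC :=
          fun x hx => hasmem x (pvMemDup as x hx)
        have hpostmem : ∀ x ∈ (if bs.isEmpty then [] else pr :: pvOps bs), x ∈ pvTagsC := by
          intro x hx
          by_cases hb : bs.isEmpty
          · simp [hb] at hx
          · rw [if_neg hb] at hx
            rcases List.mem_cons.mp hx with h | h
            · exact h ▸ hprC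
            · exact hbsmem x (pvOps_mem bs x h)
        have hprene : ∀ op ∈ (as.flatMap fun y => [y, y]), ¬ op.1 <+: pr.1 ++ u := by
          intro op hop hcontra
          have hopas : op ∈ as := pvMemDup as op hop
          have := hprev op hopas
          rw [hu] at hcontra
          simp [List.isPrefixOf_iff_prefix.mpr hcontra] at this
        have hstep1 : pvApply (as.flatMap fun y => [y, y]) (pr.1 ++ u)
            = pr.1 ++ pvApply (as.flatMap fun y => [y, y]) u := by
          refine pvChainSkip _ hpremem pr.1 ?_ u hprene
          intro op hop m hm hmlen
          exact pvFactInt pr hprC op (hpremem op hop) m hm hmlen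
        have hprne : pr.1 ≠ [] := (pvFactNe pr hprC).1
        have hp2pos : 0 < pr.2.length := by
          have := (pvFactNe pr hprC).2
          cases hh : pr.2 with
          | nil => exact absurd hh this
          | cons _ _ => simp [hh]
        have hstep3 : ∀ v, pvApply (if bs.isEmpty then [] else pr :: pvOps bs) (pr.2 ++ v)
            = pr.2 ++ pvApply (if bs.isEmpty then [] else pr :: pvOps bs) v := by
          intro v
          refine pvChainSkip _ hpostmem pr.2 ?_ v ?_
          · intro op hop m _ hmlen
            exact pvFactRep pr hprC op (hpostmem op hop) m hmlen
          · intro op hop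
            have h0 := pvFactRep pr hprC op (hpostmem op hop) 0 hp2pos
            simp only [List.drop_zero] at h0
            exact pvNoStartAppend op.1 pr.2 v h0.1 h0.2
        have hulen : u.length ≤ n := by
          have hlen : pr.1.length + u.length = t.length + 1 := by
            have := congrArg List.length hu
            simpa using this
          have hp1 : 0 < pr.1.length := by
            cases hh : pr.1 with
            | nil => exact absurd hh hprne
            | cons _ _ => simp [hh]
          omega
        calc pvApply (pvOps pvTagsC) (c :: t)
            = pvApply ((as.flatMap fun y => [y, y]) ++
                pr :: (if bs.isEmpty then [] else pr :: pvOps bs)) (pr.1 ++ u) := by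
              rw [← hu, hops]
          _ = pvApply (pr :: (if bs.isEmpty then [] else pr :: pvOps bs))
                (pvApply (as.flatMap fun y => [y, y]) (pr.1 ++ u)) := pvApply_append _ _ _
          _ = pvApply (if bs.isEmpty then [] else pr :: pvOps bs)
                (pvRepl pr.1 pr.2 (pr.1 ++ pvApply (as.flatMap fun y => [y, y]) u)) := by
              rw [hstep1, pvApply_cons]
          _ = pvApply (if bs.isEmpty then [] else pr :: pvOps bs)
                (pr.2 ++ pvRepl pr.1 pr.2 (pvApply (as.flatMap fun y => [y, y]) u)) := by
              rw [pvRepl_pref pr.1 pr.2 _ hprne]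
          _ = pr.2 ++ pvApply (if bs.isEmpty then [] else pr :: pvOps bs)
                (pvRepl pr.1 pr.2 (pvApply (as.flatMap fun y => [y, y]) u)) := hstep3 _
          _ = pr.2 ++ pvApply ((as.flatMap fun y => [y, y]) ++
                pr :: (if bs.isEmpty then [] else pr :: pvOps bs)) u := by
              rw [pvApply_append, pvApply_cons]
          _ = pr.2 ++ pvApply (pvOps pvTagsC) u := by rw [← hops]
          _ = pr.2 ++ pvScan u := by rw [ih u hulen]
          _ = pvScan (c :: t) := by
              rw [pvScan_some c t pr hf]
              congr 1
              rw [← hu, List.drop_left]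

theorem pvBridgeFold :
    ∀ (kvs : List (String × String)), (∀ kv ∈ kvs, kv.1.toList ≠ []) → ∀ m : String,
      (kvs.foldl (fun m code =>
          PySem.Str.replace (PySem.Str.replace m code.1 ("&" ++ code.2)) code.1 ("&" ++ code.2))
        m).toList
      = pvApply (kvs.flatMap fun kv =>
          [(kv.1.toList, '&' :: kv.2.toList), (kv.1.toList, '&' :: kv.2.toList)]) m.toList := by
  intro kvs
  induction kvs with
  | nil => intro _ m; rfl
  | cons kv rest ih =>
    intro hne m
    rw [List.foldl_cons, ih (fun x hx => hne x (List.mem_cons_of_mem _ hx)),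
      List.flatMap_cons, pvApply_append]
    congr 1
    have hamp : ("&" ++ kv.2).toList = '&' :: kv.2.toList := by
      rw [String.toList_append]; rfl
    rw [PySem.Str.toList_replace, PySem.Str.toList_replace, hamp,
      pvReplace_eq _ _ _ (hne kv List.mem_cons_self),
      pvReplace_eq _ _ _ (hne kv List.mem_cons_self)]
    rfl

set_option maxRecDepth 4096 in
theorem pvOpsA_eq : (pvCodesA.items.flatMap fun kv =>
      [(kv.1.toList, '&' :: kv.2.toList), (kv.1.toList, '&' :: kv.2.toList)]) ++
      [("<newline>".toList, "\n".toList)] = pvOps pvTagsC := by decide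

theorem pvPortA_toList (m : String) :
    (replace_mini_message_color_codes_with_minecraft_colors m).toList
      = pvApply (pvOps pvTagsC) m.toList := by
  unfold replace_mini_message_color_codes_with_minecraft_colors
  rw [PySem.Str.toList_replace,
    pvReplace_eq _ _ _ (by decide : ("<newline>" : String).toList ≠ []),
    pvBridgeFold pvCodesA.items (by decide) m, ← pvOpsA_eq, pvApply_append]
  rfl

-- ===== VERDICT (by name: the statement is the Claim_ definition above) =====
theorem replace_mini_message_color_codes_with_minecraft_colors_spec : Claim_equal_replace_mini_message_color_codes_with_minecraft_colors := by
  intro message _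
  unfold Spec_replace_mini_message_color_codes_with_minecraft_colors
    replace_mini_message_color_codes_with_minecraft_colors_alt
  rw [← pvMain message.toList.length message.toList le_rfl, ← pvPortA_toList message,
    String.ofList_toList]
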